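-- pv_equiv track=rewrite | github.com/superit23/samson | samson/math/general.py | newton_method_sizes
-- ===== SOURCE A (Python) =====
-- from typing import Tuple, List
--
-- def newton_method_sizes(prec: int) -> List[int]:
--     """
--     Generates a precision ladder for Netwon's method.
--
--     Parameters:
--         prec (int): Desired final precision.
--
--     Returns:
--         List[int]: Optimized precision ladder.
--     """
--     output = []
--     while prec > 1:
--         output.append(prec)
--         prec = (prec + 1) >> 1
--
--     output.append(1)
--     output.reverse()
--
--     return output
-- ===== SOURCE B (Python) =====
-- from typing import List
--
-- def newton_method_sizes(prec: int) -> List[int]: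
--     if prec <= 1:
--         return [1]
--     return newton_method_sizes((prec + 1) >> 1) + [prec]
-- ===== Notes on version B (the rewrite author's own statement) =====
-- stated objective: simpler
-- what changed: Replaces the collect-then-reverse while loop by a direct recursion on the halved precision that builds the ladder in ascending order with no accumulator and no reverse.
import Mathlib
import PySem

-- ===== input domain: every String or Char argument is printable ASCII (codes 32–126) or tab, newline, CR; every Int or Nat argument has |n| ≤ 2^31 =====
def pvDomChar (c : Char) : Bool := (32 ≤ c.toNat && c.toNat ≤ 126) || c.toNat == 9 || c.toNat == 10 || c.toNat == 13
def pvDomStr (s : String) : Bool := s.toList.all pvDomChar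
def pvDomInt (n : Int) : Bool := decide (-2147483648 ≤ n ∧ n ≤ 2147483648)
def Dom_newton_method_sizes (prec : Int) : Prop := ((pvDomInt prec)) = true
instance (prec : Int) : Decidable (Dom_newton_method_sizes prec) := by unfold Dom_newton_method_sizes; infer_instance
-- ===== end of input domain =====

-- B builds the ladder ascending by direct recursion (no accumulator, no reverse); objective: simpler.
-- ===== PORT A =====
-- while loop of A: append prec, halve, until prec <= 1
def nmsLoop (prec : Int) (output : List Int) : List Int :=
  if 1 < prec then
    nmsLoop (PySem.Int.floordiv (prec + 1) 2) (output ++ [prec])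
  else output
termination_by prec.toNat
decreasing_by
  simp only [PySem.Int.floordiv_eq_ediv_of_pos (by omega : (0:Int) < 2)]
  omega

def newton_method_sizes (prec : Int) : List Int :=
  ((nmsLoop prec []) ++ [1]).reverse

-- ===== PORT B =====
def newton_method_sizes_alt (prec : Int) : List Int :=
  if prec ≤ 1 then [1]
  else newton_method_sizes_alt (PySem.Int.floordiv (prec + 1) 2) ++ [prec]
termination_by prec.toNat
decreasing_by
  simp only [PySem.Int.floordiv_eq_ediv_of_pos (by omega : (0:Int) < 2)]
  omega

-- ===== PRECONDITION & SPEC =====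
def Spec_newton_method_sizes (prec : Int) (out : List Int) : Prop := out = newton_method_sizes_alt prec
instance (prec : Int) (out : List Int) : Decidable (Spec_newton_method_sizes prec out) := by unfold Spec_newton_method_sizes; infer_instance

-- ===== CLAIM (what is proved, stated in full; the proofs are below) =====
def Claim_equal_newton_method_sizes : Prop := ∀ (prec : Int), Dom_newton_method_sizes prec → Spec_newton_method_sizes prec (newton_method_sizes prec)

-- ===== LEMMAS AND PROOFS =====

-- ===== VERDICT (by name: the statement is the Claim_ definition above) =====
lemma nmsLoop_append (prec : Int) (out : List Int) :
    nmsLoop prec out = out ++ nmsLoop prec [] := by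
  conv_lhs => rw [nmsLoop]
  conv_rhs => rw [nmsLoop]
  by_cases hp : 1 < prec
  · rw [if_pos hp, if_pos hp,
        nmsLoop_append (PySem.Int.floordiv (prec + 1) 2) (out ++ [prec])]
    simp only [List.nil_append]
    rw [nmsLoop_append (PySem.Int.floordiv (prec + 1) 2) ([prec])]
    simp
  · rw [if_neg hp, if_neg hp]
    simp
termination_by prec.toNat
decreasing_by
  all_goals simp only [PySem.Int.floordiv_eq_ediv_of_pos (by omega : (0:Int) < 2)]
  all_goals omega

lemma nms_eq_alt (prec : Int) :
    ((nmsLoop prec []) ++ [1]).reverse = newton_method_sizes_alt prec := by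
  conv_lhs => rw [nmsLoop]
  rw [newton_method_sizes_alt]
  by_cases hp : 1 < prec
  · rw [if_pos hp, if_neg (by omega), nmsLoop_append,
        ← nms_eq_alt (PySem.Int.floordiv (prec + 1) 2)]
    simp
  · rw [if_neg hp, if_pos (by omega)]
    simp
termination_by prec.toNat
decreasing_by
  simp only [PySem.Int.floordiv_eq_ediv_of_pos (by omega : (0:Int) < 2)]
  omega

theorem newton_method_sizes_spec : Claim_equal_newton_method_sizes := by
  intro prec _
  unfold Spec_newton_method_sizes newton_method_sizes
  exact nms_eq_alt prec
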